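-- pv_equiv track=rewrite | github.com/tqx5201/AI-Lottery-Predictor | src/streaming/realtime_processor.py | _check_consecutive_pattern
-- ===== SOURCE A (Python) =====
-- from typing import Dict, List, Any, Optional, Callable, AsyncGenerator
--
-- def _check_consecutive_pattern(data: Dict[str, Any]) -> bool:
--     """检查连续号码模式"""
--     if 'numbers' in data and 'red' in data['numbers']:
--         red_numbers = sorted(data['numbers']['red'])
--         consecutive_count = 0
--
--         for i in range(1, len(red_numbers)):
--             if red_numbers[i] - red_numbers[i-1] == 1:
--                 consecutive_count += 1
--
--         return consecutive_count >= 3  # 3个或更多连续号码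
--     return False
-- ===== SOURCE B (Python) =====
-- def _check_consecutive_pattern(data):
--     """Check for 3+ consecutive red numbers via set membership instead of sort+adjacent scan."""
--     if 'numbers' in data and 'red' in data['numbers']:
--         reds = set(data['numbers']['red'])
--         return sum(1 for n in reds if n + 1 in reds) >= 3
--     return False
-- ===== Notes on version B (the rewrite author's own statement) =====
-- stated objective: simpler
-- what changed: Replaces sort + index-based adjacent-difference scan with a set and a single membership-count of values n with n+1 also present.
import Mathlib
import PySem

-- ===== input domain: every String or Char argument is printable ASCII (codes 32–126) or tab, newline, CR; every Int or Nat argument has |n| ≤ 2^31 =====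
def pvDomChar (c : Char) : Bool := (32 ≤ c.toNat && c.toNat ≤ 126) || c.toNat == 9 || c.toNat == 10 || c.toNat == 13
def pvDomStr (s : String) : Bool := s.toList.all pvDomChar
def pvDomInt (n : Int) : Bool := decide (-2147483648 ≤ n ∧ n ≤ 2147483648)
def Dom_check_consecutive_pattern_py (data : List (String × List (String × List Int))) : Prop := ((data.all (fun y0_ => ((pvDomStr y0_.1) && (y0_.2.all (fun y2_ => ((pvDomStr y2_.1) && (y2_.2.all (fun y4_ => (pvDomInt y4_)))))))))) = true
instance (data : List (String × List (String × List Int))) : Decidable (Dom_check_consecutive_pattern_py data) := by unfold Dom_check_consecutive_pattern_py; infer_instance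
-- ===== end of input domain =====

-- B replaces A's sort + adjacent-difference scan by a set and a membership count (simpler, no sort).

-- ===== PORT A =====
def check_consecutive_pattern_py (data : List (String × List (String × List Int))) : Bool :=
  let d := PySem.Dict.mk data
  if d.contains "numbers" && (PySem.Dict.mk (d.getD "numbers" [])).contains "red" then
    let red_numbers := PySem.List.sorted ((PySem.Dict.mk (d.getD "numbers" [])).getD "red" []) (fun x => x) false
    let consecutive_count : Int :=
      (PySem.List.pyRange 1 (red_numbers.length : Int) 1).foldl
        (fun c i =>
          if PySem.List.pyGetD red_numbers i 0 - PySem.List.pyGetD red_numbers (i - 1) 0 = 1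
          then c + 1 else c) 0
    decide (3 ≤ consecutive_count)
  else false

-- ===== PORT B =====
def check_consecutive_pattern_py_alt (data : List (String × List (String × List Int))) : Bool :=
  let d := PySem.Dict.mk data
  if d.contains "numbers" && (PySem.Dict.mk (d.getD "numbers" [])).contains "red" then
    let reds : PySem.Set Int := PySem.Set.ofList ((PySem.Dict.mk (d.getD "numbers" [])).getD "red" [])
    decide (3 ≤ (reds.filter (fun n => PySem.Set.contains reds (n + 1))).length)
  else false

-- ===== PRECONDITION & SPEC =====
def Spec_check_consecutive_pattern_py (data : List (String × List (String × List Int))) (out : Bool) : Prop := out = check_consecutive_pattern_py_alt data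
instance (data : List (String × List (String × List Int))) (out : Bool) : Decidable (Spec_check_consecutive_pattern_py data out) := by unfold Spec_check_consecutive_pattern_py; infer_instance

-- ===== CLAIM (what is proved, stated in full; the proofs are below) =====
def Claim_equal_check_consecutive_pattern_py : Prop := ∀ (data : List (String × List (String × List Int))), Dom_check_consecutive_pattern_py data → Spec_check_consecutive_pattern_py data (check_consecutive_pattern_py data)

-- ===== LEMMAS AND PROOFS =====

-- number of adjacent pairs at distance exactly 1 (proof-only helper)
def cntPairs : List Int → Int
  | [] => 0
  | [_] => 0
  | a :: b :: t => (if b - a = 1 then 1 else 0) + cntPairs (b :: t)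

-- A's index loop computes cntPairs of the list
lemma foldl_range_getD (red : List Int) (c : Int) :
    (List.range (red.length - 1)).foldl
      (fun c k => if red.getD (k + 1) 0 - red.getD k 0 = 1 then c + 1 else c) c
      = c + cntPairs red := by
  induction red generalizing c with
  | nil => simp [cntPairs]
  | cons a l ih =>
    cases l with
    | nil => simp [cntPairs]
    | cons b t =>
      have hlen : (a :: b :: t).length - 1 = ((b :: t).length - 1) + 1 := by
        simp
      rw [hlen, List.range_succ_eq_map, List.foldl_cons, List.foldl_map]
      simp only [List.getD_cons_succ, List.getD_cons_zero]
      have ih' := ih (if b - a = 1 then c + 1 else c)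
      simp only [List.getD_cons_succ] at ih'
      rw [ih']
      simp [cntPairs]
      split_ifs <;> ring

lemma loopA_eq_cntPairs (red : List Int) :
    (PySem.List.pyRange 1 (red.length : Int) 1).foldl
      (fun c i =>
        if PySem.List.pyGetD red i 0 - PySem.List.pyGetD red (i - 1) 0 = 1
        then c + 1 else c) (0 : Int) = cntPairs red := by
  rw [PySem.List.pyRange_one, List.foldl_map]
  have h1 : ((red.length : Int) - 1).toNat = red.length - 1 := by omega
  rw [h1]
  have hstep : (List.range (red.length - 1)).foldl
      (fun c (k : Nat) =>
        if PySem.List.pyGetD red (1 + (k : Int)) 0 - PySem.List.pyGetD red (1 + (k : Int) - 1) 0 = 1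
        then c + 1 else c) (0 : Int)
      = (List.range (red.length - 1)).foldl
      (fun c k => if red.getD (k + 1) 0 - red.getD k 0 = 1 then c + 1 else c) (0 : Int) := by
    apply List.foldl_ext
    intro acc k _
    have e1 : (1 : Int) + (k : Int) = ((k + 1 : Nat) : Int) := by push_cast; ring
    have e2 : (1 : Int) + (k : Int) - 1 = ((k : Nat) : Int) := by omega
    rw [e2, e1, PySem.List.pyGetD_natCast, PySem.List.pyGetD_natCast]
  rw [hstep, foldl_range_getD]
  ring

-- for a sorted list, cntPairs counts the distinct values v with v+1 also present
lemma cntPairs_sorted (l : List Int) (hs : l.Pairwise (· ≤ ·)) :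
    cntPairs l = ((l.toFinset.filter (fun v => v + 1 ∈ l.toFinset)).card : Int) := by
  induction l with
  | nil => simp [cntPairs]
  | cons a l ih =>
    cases l with
    | nil => norm_num [cntPairs, Finset.filter_singleton]
    | cons b t =>
      obtain ⟨ha, hbt⟩ := List.pairwise_cons.mp hs
      have hab : a ≤ b := ha b (by simp)
      have hb_le : ∀ x ∈ b :: t, b ≤ x := by
        obtain ⟨hb, ht⟩ := List.pairwise_cons.mp hbt
        intro x hx
        rcases List.mem_cons.mp hx with h | h
        · omega
        · exact hb x h
      by_cases heq : a = b
      · -- duplicate head: drops out of both sides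
        subst heq
        have h1 : cntPairs (a :: a :: t) = cntPairs (a :: t) := by
          simp [cntPairs]
        have h2 : (a :: a :: t).toFinset = (a :: t).toFinset := by simp
        rw [h1, h2, ih hbt]
      · have hlt : a < b := lt_of_le_of_ne hab heq
        have hanotin : a ∉ (b :: t).toFinset := by
          simp only [List.mem_toFinset]
          intro hmem
          exact absurd (hb_le a hmem) (by omega)
        -- membership of v+1 in the full set vs the tail set, for v in the tail
        have hpred_tail : ∀ v ∈ (b :: t).toFinset,
            (v + 1 ∈ (a :: b :: t).toFinset) = (v + 1 ∈ (b :: t).toFinset) := by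
          intro v hv
          have hvb : b ≤ v := hb_le v (List.mem_toFinset.mp hv)
          simp only [List.toFinset_cons, Finset.mem_insert, eq_iff_iff]
          constructor
          · rintro (h | h)
            · omega
            · exact h
          · intro h; right; exact h
        have hpred_a : (a + 1 ∈ (a :: b :: t).toFinset) = (b = a + 1) := by
          simp only [List.toFinset_cons, Finset.mem_insert, List.mem_toFinset, eq_iff_iff]
          constructor
          · rintro (h | h | h)
            · omega
            · omega
            · have := hb_le (a + 1) (List.mem_cons_of_mem _ h); omega
          · intro h; right; left; omega
        have hsplit : (a :: b :: t).toFinset = insert a ((b :: t).toFinset) := by simp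
        rw [hsplit]
        rw [Finset.filter_insert]
        have hfc : Finset.filter (fun v => v + 1 ∈ insert a ((b :: t).toFinset)) ((b :: t).toFinset)
            = Finset.filter (fun v => v + 1 ∈ (b :: t).toFinset) ((b :: t).toFinset) := by
          apply Finset.filter_congr
          intro v hv
          have hvb : b ≤ v := hb_le v (List.mem_toFinset.mp hv)
          rw [Finset.mem_insert]
          constructor
          · rintro (h | h)
            · exact absurd h (by omega)
            · exact h
          · exact fun h => Or.inr h
        by_cases hc : b = a + 1
        · have hpa : a + 1 ∈ insert a ((b :: t).toFinset) := by
            rw [← hsplit, hpred_a]; exact hc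
          rw [if_pos hpa, hfc]
          have hcard : (insert a (Finset.filter (fun v => v + 1 ∈ (b :: t).toFinset) ((b :: t).toFinset))).card
              = (Finset.filter (fun v => v + 1 ∈ (b :: t).toFinset) ((b :: t).toFinset)).card + 1 := by
            apply Finset.card_insert_of_notMem
            intro hmem
            exact hanotin (Finset.mem_of_mem_filter _ hmem)
          rw [hcard]
          have : cntPairs (a :: b :: t) = 1 + cntPairs (b :: t) := by
            simp [cntPairs]; omega
          rw [this, ih hbt]; push_cast; ring
        · have hpa : a + 1 ∉ insert a ((b :: t).toFinset) := by
            rw [← hsplit, hpred_a]; exact hc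
          rw [if_neg hpa, hfc]
          have : cntPairs (a :: b :: t) = cntPairs (b :: t) := by
            simp [cntPairs]; omega
          rw [this, ih hbt]

-- B's count over the deduplicated set, as a Finset card
lemma countB_eq_card (red : List Int) :
    (((PySem.Set.ofList red).filter
        (fun n => PySem.Set.contains (PySem.Set.ofList red) (n + 1))).length : Int)
      = ((red.toFinset.filter (fun v => v + 1 ∈ red.toFinset)).card : Int) := by
  have hnodup : (PySem.Set.ofList red).Nodup := PySem.Set.nodup_ofList red
  have hfn : (PySem.Set.ofList red).filter (fun n => PySem.Set.contains (PySem.Set.ofList red) (n + 1))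
      = (PySem.Set.ofList red).filter (fun n => decide (n + 1 ∈ red.toFinset)) := by
    apply List.filter_congr
    intro x _
    by_cases hmem : x + 1 ∈ red
    · simp [hmem]
    · simp [hmem]
  rw [hfn]
  have hnodupf : ((PySem.Set.ofList red).filter (fun n => decide (n + 1 ∈ red.toFinset))).Nodup :=
    hnodup.filter _
  rw [← List.toFinset_card_of_nodup hnodupf]
  have hts : ((PySem.Set.ofList red).filter (fun n => decide (n + 1 ∈ red.toFinset))).toFinset
      = red.toFinset.filter (fun v => v + 1 ∈ red.toFinset) := by
    rw [List.toFinset_filter]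
    apply Finset.ext
    intro x
    simp [PySem.Set.mem_ofList]
  rw [hts]

-- the core fact: A's count on sorted(red) equals B's count on set(red)
lemma counts_eq (red : List Int) :
    (PySem.List.pyRange 1 ((PySem.List.sorted red (fun x => x) false).length : Int) 1).foldl
      (fun c i =>
        if PySem.List.pyGetD (PySem.List.sorted red (fun x => x) false) i 0
           - PySem.List.pyGetD (PySem.List.sorted red (fun x => x) false) (i - 1) 0 = 1
        then c + 1 else c) (0 : Int)
      = (((PySem.Set.ofList red).filter
          (fun n => PySem.Set.contains (PySem.Set.ofList red) (n + 1))).length : Int) := by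
  rw [loopA_eq_cntPairs, countB_eq_card]
  have hs : (PySem.List.sorted red (fun x => x) false).Pairwise (· ≤ ·) := by
    have := PySem.List.sorted_pairwise red (fun x => x) (κ := Int)
    simpa using this
  rw [cntPairs_sorted _ hs]
  have hfs : (PySem.List.sorted red (fun x => x) false).toFinset = red.toFinset := by
    apply Finset.ext; intro x
    simp [List.mem_toFinset, PySem.List.mem_sorted]
  rw [hfs]

-- ===== VERDICT (by name: the statement is the Claim_ definition above) =====
theorem check_consecutive_pattern_py_spec : Claim_equal_check_consecutive_pattern_py := by
  intro data _
  unfold Spec_check_consecutive_pattern_py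
  simp only [check_consecutive_pattern_py, check_consecutive_pattern_py_alt]
  by_cases hg : ((PySem.Dict.mk data).contains "numbers"
      && (PySem.Dict.mk ((PySem.Dict.mk data).getD "numbers" [])).contains "red") = true
  · rw [hg]
    simp only [reduceIte]
    rw [decide_eq_decide]
    have h := counts_eq ((PySem.Dict.mk ((PySem.Dict.mk data).getD "numbers" [])).getD "red" [])
    omega
  · rw [Bool.not_eq_true] at hg
    rw [hg]
    simp only [Bool.false_eq_true, if_false]
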